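-- pv_equiv track=rewrite | github.com/whateverworks02/AoC_2025 | day06/solver.py | parse_vertical_numbers
-- ===== SOURCE A (Python) =====
-- def parse_vertical_numbers(grid):
--     if not grid:
--         return []
--
--     max_len = max(len(row) for row in grid)
--     cur = []
--     ans = []
--
--     for col in range(max_len):
--         vertical_num = []
--         for row in grid:
--             if col < len(row) and row[col] != " ":
--                 vertical_num.append(row[col])
--
--         if vertical_num:
--             cur.append(int("".join(vertical_num)))
--         else:
--             ans.append(cur)
--             cur = []
--     if cur:
--         ans.append(cur)
--     return ans
-- ===== SOURCE B (Python) =====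
-- def parse_vertical_numbers(grid):
--     # Build the column strings incrementally, row by row (row-major), then
--     # split them into groups recursively at the first empty column.
--     width = max(map(len, grid), default=0)
--     cols = [''] * width
--     for row in grid:
--         for c, ch in enumerate(row):
--             if ch != ' ':
--                 cols[c] += ch
--     return _split_groups(cols)
--
--
-- def _split_groups(cols):
--     if '' not in cols:
--         return [[int(s) for s in cols]] if cols else []
--     i = cols.index('')
--     return [[int(s) for s in cols[:i]]] + _split_groups(cols[i + 1:])
-- ===== Notes on version B (the rewrite author's own statement) =====
-- stated objective: alternative
-- what changed: B builds the column strings incrementally row-by-row (a mutable table updated per character, row-major traversal) instead of A's column-major nested rescans, and replaces A's cur/ans flush accumulator with a recursive splitter that slices the column list at the first empty column.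
import Mathlib
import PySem

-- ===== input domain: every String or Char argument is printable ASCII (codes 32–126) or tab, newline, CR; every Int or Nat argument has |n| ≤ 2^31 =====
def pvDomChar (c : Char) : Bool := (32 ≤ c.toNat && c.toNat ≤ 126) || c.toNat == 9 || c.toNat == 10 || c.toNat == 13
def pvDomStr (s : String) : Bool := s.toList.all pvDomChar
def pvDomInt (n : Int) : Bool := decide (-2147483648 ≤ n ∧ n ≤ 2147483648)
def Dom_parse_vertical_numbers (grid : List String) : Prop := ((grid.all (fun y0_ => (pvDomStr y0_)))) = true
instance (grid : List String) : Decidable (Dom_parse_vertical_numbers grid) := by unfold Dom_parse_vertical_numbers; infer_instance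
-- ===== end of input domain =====

-- B builds the column strings row by row in one mutable table and then splits them into
-- groups recursively at the first empty column, instead of A's column-major nested rescans
-- with a cur/ans flush accumulator; objective: an alternative decomposition, same cost.

-- ===== PORT A =====
-- the inner 'for row in grid' loop collecting the non-space characters of column `col`
def pvColA (grid : List String) (col : Nat) : List Char :=
  grid.foldl (fun acc row =>
    if col < row.toList.length ∧ row.toList.getD col ' ' ≠ ' '
    then acc ++ [row.toList.getD col ' '] else acc) []

-- the body of the 'for col in range(max_len)' loop on the state (cur, ans);
-- int("".join(vertical_num)) = PySem.Int.ofChars?; Pre_ excludes the ValueError (none) case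
def pvStepA (st : List Int × List (List Int)) (chars : List Char) :
    List Int × List (List Int) :=
  if chars ≠ [] then (st.1 ++ [(PySem.Int.ofChars? chars).getD 0], st.2)
  else ([], st.2 ++ [st.1])

def parse_vertical_numbers (grid : List String) : List (List Int) :=
  if grid.isEmpty then []
  else
    -- max(len(row) for row in grid); grid is nonempty here, so max? is some
    let max_len := (PySem.List.max? (grid.map (fun r => r.toList.length)) (fun x => x)).getD 0
    let st := (List.range max_len).foldl (fun st col => pvStepA st (pvColA grid col)) ([], [])
    if st.1 ≠ [] then st.2 ++ [st.1] else st.2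

-- ===== PORT B =====
-- int(s); Pre_ excludes the ValueError (none) case, exactly as on A's side
def pvToInt (s : List Char) : Int := (PySem.Int.ofChars? s).getD 0

-- _split_groups(cols): recursively slice the column list at the first empty column
def pvSplitGroups (cols : List (List Char)) : List (List Int) :=
  match h : PySem.List.index? cols ([] : List Char) with
  | none => if cols ≠ [] then [cols.map pvToInt] else []
  | some i => (cols.take i).map pvToInt :: pvSplitGroups (cols.drop (i + 1))
termination_by cols.length
decreasing_by
  obtain ⟨hk, -⟩ := PySem.List.getElem_of_index?_eq_some h
  simp only [List.length_drop]; omega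

-- the inner 'for c, ch in enumerate(row): if ch != " ": cols[c] += ch' loop
def pvRowStep (cols : List (List Char)) (row : String) : List (List Char) :=
  (PySem.List.enumerate row.toList 0).foldl
    (fun cols p =>
      if p.2 ≠ ' '
      then PySem.List.pySetD cols p.1 (PySem.List.pyGetD cols p.1 [] ++ [p.2])
      else cols) cols

def parse_vertical_numbers_alt (grid : List String) : List (List Int) :=
  -- width = max(map(len, grid), default=0)
  let width := PySem.List.maxD (grid.map (fun r => r.toList.length)) (fun x => x) 0
  -- cols = [''] * width, then fill it row by row
  pvSplitGroups (grid.foldl pvRowStep (List.replicate width ([] : List Char)))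

-- ===== PRECONDITION & SPEC =====
-- the non-space characters of column c (used only to state Pre_)
def pvColChars (grid : List String) (c : Nat) : List Char :=
  (grid.map (fun r => r.toList.getD c ' ')).filter (fun ch => ch ≠ ' ')

-- Pre_ excludes exactly the grids on which A raises ValueError: some non-empty column whose
-- non-space characters do not form a Python int literal (B raises there too).
def Pre_parse_vertical_numbers (grid : List String) : Prop :=
  ∀ c ∈ List.range ((PySem.List.max? (grid.map (fun r => r.toList.length)) (fun x => x)).getD 0),
    pvColChars grid c = [] ∨ (PySem.Int.ofChars? (pvColChars grid c)).isSome
instance (grid : List String) : Decidable (Pre_parse_vertical_numbers grid) := by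
  unfold Pre_parse_vertical_numbers; infer_instance

def pvWitness_parse_vertical_numbers : List String := ["1 2", "3 4"]

def Spec_parse_vertical_numbers (grid : List String) (out : List (List Int)) : Prop := out = parse_vertical_numbers_alt grid
instance (grid : List String) (out : List (List Int)) : Decidable (Spec_parse_vertical_numbers grid out) := by unfold Spec_parse_vertical_numbers; infer_instance

-- ===== CLAIM (what is proved, stated in full; the proofs are below) =====
def Claim_equal_parse_vertical_numbers : Prop := ∀ (grid : List String), Dom_parse_vertical_numbers grid → Pre_parse_vertical_numbers grid → Spec_parse_vertical_numbers grid (parse_vertical_numbers grid)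

-- ===== LEMMAS AND PROOFS =====

-- A's inner row scan is the filtered column projection
theorem pvColA_eq_aux (grid : List String) (c : Nat) (acc : List Char) :
    grid.foldl (fun acc row =>
      if c < row.toList.length ∧ row.toList.getD c ' ' ≠ ' '
      then acc ++ [row.toList.getD c ' '] else acc) acc
    = acc ++ (grid.map (fun r => r.toList.getD c ' ')).filter (fun ch => ch ≠ ' ') := by
  induction grid generalizing acc with
  | nil => simp
  | cons r t ih =>
    simp only [List.foldl_cons, List.map_cons, List.filter_cons, ih]
    by_cases h1 : c < r.toList.length
    · have h1q : c < r.length := by simpa using h1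
      by_cases h2 : r.toList[c]'h1 = ' ' <;> simp [List.getD, h1q, h2]
    · have h1q : ¬ c < r.length := by simpa using h1
      have hg : r.toList.getD c ' ' = ' ' := List.getD_eq_default _ _ (by omega)
      simp [List.getD, h1q]

-- A's inner row scan is the filtered column projection
theorem pvColA_eq (grid : List String) (c : Nat) :
    pvColA grid c = pvColChars grid c := by
  unfold pvColA pvColChars
  simpa using pvColA_eq_aux grid c []

-- what one row adds to column j (empty when j is past the row's end or holds a space)
def pvContrib (row : List Char) (j : Nat) : List Char :=
  if row.getD j ' ' ≠ ' ' then [row.getD j ' '] else []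

-- elementwise effect of the per-row fill loop, for an arbitrary enumerate offset k
theorem pvRowFold_getElem? (row : List Char) (k : Nat) (cols : List (List Char)) (j : Nat) :
    ((PySem.List.enumerate row (k : Int)).foldl
      (fun cols p =>
        if p.2 ≠ ' '
        then PySem.List.pySetD cols p.1 (PySem.List.pyGetD cols p.1 [] ++ [p.2])
        else cols) cols)[j]? =
    cols[j]?.map (fun l => l ++ if k ≤ j then pvContrib row (j - k) else []) := by
  induction row generalizing k cols with
  | nil =>
    simp only [PySem.List.enumerate_nil, List.foldl_nil, pvContrib]
    cases cols[j]? <;> simp [List.getD]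
  | cons ch rest ih =>
    rw [PySem.List.enumerate_cons, List.foldl_cons]
    have hcast : (k : Int) + 1 = ((k + 1 : Nat) : Int) := by push_cast; ring
    rw [hcast, ih]
    by_cases hch : ch = ' '
    · simp only [hch, ne_eq, not_true_eq_false, if_false]
      cases hcj : cols[j]? with
      | none => rfl
      | some l =>
        simp only [Option.map_some, Option.some.injEq]
        congr 1
        rcases Nat.lt_trichotomy j k with hjk | hjk | hjk
        · rw [if_neg (by omega), if_neg (by omega)]
        · subst hjk
          rw [if_neg (by omega), if_pos le_rfl]
          simp [pvContrib, List.getD]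
        · rw [if_pos (by omega), if_pos (by omega)]
          have : j - k = (j - (k + 1)) + 1 := by omega
          rw [this]
          simp [pvContrib, List.getD]
    · simp only [ne_eq, hch, not_false_eq_true, if_true, PySem.List.pySetD_natCast,
        PySem.List.pyGetD_natCast]
      rcases Nat.lt_trichotomy j k with hjk | hjk | hjk
      · rw [List.getElem?_set_ne (by omega)]
        cases cols[j]? with
        | none => rfl
        | some l =>
          simp only [Option.map_some, Option.some.injEq]
          congr 1
          rw [if_neg (by omega), if_neg (by omega)]
      · subst hjk
        by_cases hlen : j < cols.length
        · rw [List.getElem?_set_self hlen, List.getElem?_eq_getElem hlen]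
          simp only [Option.map_some, Option.some.injEq]
          rw [if_neg (by omega), if_pos le_rfl]
          simp [pvContrib, List.getD, hch, List.getElem?_eq_getElem hlen]
        · have h1 : (cols.set j (cols.getD j [] ++ [ch]))[j]? = none := by
            rw [List.getElem?_eq_none]; simp; omega
          have h2 : cols[j]? = (none : Option (List Char)) :=
            List.getElem?_eq_none (by omega)
          rw [h1, h2]
          rfl
      · rw [List.getElem?_set_ne (by omega)]
        cases cols[j]? with
        | none => rfl
        | some l =>
          simp only [Option.map_some, Option.some.injEq]
          congr 1
          rw [if_pos (by omega), if_pos (by omega)]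
          have : j - k = (j - (k + 1)) + 1 := by omega
          rw [this]
          simp [pvContrib, List.getD]

-- elementwise effect of the whole row-by-row fill
theorem pvGridFold_getElem? (grid : List String) (cols : List (List Char)) (j : Nat) :
    (grid.foldl pvRowStep cols)[j]? = cols[j]?.map (fun l => l ++ pvColChars grid j) := by
  induction grid generalizing cols with
  | nil =>
    simp only [List.foldl_nil, pvColChars, List.map_nil, List.filter_nil, List.append_nil]
    cases cols[j]? <;> rfl
  | cons r t ih =>
    rw [List.foldl_cons, ih]
    have h0 : pvRowStep cols r =
        (PySem.List.enumerate r.toList ((0 : Nat) : Int)).foldl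
          (fun cols p =>
            if p.2 ≠ ' '
            then PySem.List.pySetD cols p.1 (PySem.List.pyGetD cols p.1 [] ++ [p.2])
            else cols) cols := by
      simp [pvRowStep]
    rw [h0, pvRowFold_getElem? r.toList 0 cols j]
    cases hcj : cols[j]? with
    | none => rfl
    | some l =>
      simp only [Option.map_some, Option.some.injEq]
      rw [if_pos (Nat.zero_le j), Nat.sub_zero, List.append_assoc]
      congr 1
      simp only [pvColChars, List.map_cons, List.filter_cons, pvContrib]
      split <;> simp_all

-- the filled table is exactly the list of column strings
theorem pvCols_eq (grid : List String) (w : Nat) :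
    grid.foldl pvRowStep (List.replicate w ([] : List Char))
      = (List.range w).map (fun j => pvColChars grid j) := by
  apply List.ext_getElem?
  intro j
  rw [pvGridFold_getElem?]
  by_cases hj : j < w
  · rw [List.getElem?_eq_getElem (by simpa using hj),
      List.getElem?_eq_getElem (by simpa using hj)]
    simp
  · rw [List.getElem?_eq_none (by simpa using hj), List.getElem?_eq_none (by simpa using hj)]
    rfl

-- specification-level grouping: A's cur/ans loop seen as a function of the column list
def pvG : List Int → List (List Char) → List (List Int)
  | cur, [] => if cur ≠ [] then [cur] else []
  | cur, c :: cs => if c ≠ [] then pvG (cur ++ [pvToInt c]) cs else cur :: pvG [] cs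

-- A's fold plus its final flush computes pvG
theorem pvFoldA (cols : List (List Char)) (cur : List Int) (ans : List (List Int)) :
    (fun st => if st.1 ≠ [] then st.2 ++ [st.1] else st.2) (cols.foldl pvStepA (cur, ans))
      = ans ++ pvG cur cols := by
  induction cols generalizing cur ans with
  | nil =>
    simp only [List.foldl_nil, pvG]
    split <;> simp
  | cons c cs ih =>
    rw [List.foldl_cons]
    by_cases hc : c = []
    · subst hc
      simp only [pvStepA, ne_eq, not_true_eq_false, if_false, pvG, ih]
      simp
    · simp only [pvStepA, ne_eq, hc, not_false_eq_true, if_true, pvG, ih, pvToInt]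

-- pvG on a list without empty columns yields at most one group
theorem pvG_no_empty (cols : List (List Char)) (h : ∀ x ∈ cols, x ≠ []) (cur : List Int) :
    pvG cur cols
      = if cur ++ cols.map pvToInt ≠ [] then [cur ++ cols.map pvToInt] else [] := by
  induction cols generalizing cur with
  | nil => simp [pvG]
  | cons c cs ih =>
    have hc : c ≠ [] := h c (by simp)
    simp only [pvG, ne_eq, hc, not_false_eq_true, if_true]
    rw [ih (fun x hx => h x (by simp [hx]))]
    simp

-- pvG splits off one group at the first empty column
theorem pvG_split (pre : List (List Char)) (h : ∀ x ∈ pre, x ≠ []) (cur : List Int)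
    (suf : List (List Char)) :
    pvG cur (pre ++ [] :: suf) = (cur ++ pre.map pvToInt) :: pvG [] suf := by
  induction pre generalizing cur with
  | nil => simp [pvG]
  | cons p ps ih =>
    have hp : p ≠ [] := h p (by simp)
    simp only [List.cons_append, pvG, ne_eq, hp, not_false_eq_true, if_true]
    rw [ih (fun x hx => h x (by simp [hx]))]
    simp

-- the recursive splitter computes pvG from the empty accumulator
theorem pvSplitGroups_eq (cols : List (List Char)) : pvSplitGroups cols = pvG [] cols := by
  fun_induction pvSplitGroups cols with
  | case1 cols h hne =>
    have hmem : ([] : List Char) ∉ cols := (PySem.List.index?_eq_none_iff _ _).mp h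
    rw [pvG_no_empty cols (fun x hx => by rintro rfl; exact hmem hx) []]
    simp only [List.nil_append]
    rw [if_pos (by simpa using hne)]
  | case2 cols h hne =>
    have hnil : cols = [] := by simpa using hne
    subst hnil
    rfl
  | case3 cols i h ih =>
    obtain ⟨pre, suf, hdec, hlen, hpre⟩ := (PySem.List.index?_eq_some_iff _ _ _).mp h
    subst hdec
    have htake : (pre ++ ([] : List Char) :: suf).take i = pre := by
      rw [← hlen, List.take_left]
    have hdrop : (pre ++ ([] : List Char) :: suf).drop (i + 1) = suf := by
      rw [← hlen]
      rw [show pre.length + 1 = (pre ++ [([] : List Char)]).length by simp]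
      rw [show pre ++ ([] : List Char) :: suf = (pre ++ [([] : List Char)]) ++ suf by simp]
      exact List.drop_left
    rw [hdrop] at ih
    rw [htake, hdrop, pvG_split pre (fun x hx => by rintro rfl; exact hpre hx) [] suf, ih]
    simp

-- ===== VERDICT (by name: the statement is the Claim_ definition above) =====
theorem parse_vertical_numbers_spec : Claim_equal_parse_vertical_numbers := by
  intro grid _ _
  unfold Spec_parse_vertical_numbers
  cases grid with
  | nil =>
    show parse_vertical_numbers [] = parse_vertical_numbers_alt []
    have h1 : parse_vertical_numbers [] = [] := rfl
    have h2 : parse_vertical_numbers_alt [] = pvSplitGroups [] := rfl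
    rw [h1, h2, pvSplitGroups_eq]
    rfl
  | cons g gs =>
    unfold parse_vertical_numbers parse_vertical_numbers_alt
    simp only [List.isEmpty_cons, Bool.false_eq_true, if_false]
    have hw : PySem.List.maxD ((g :: gs).map (fun r => r.toList.length)) (fun x => x) 0
        = (PySem.List.max? ((g :: gs).map (fun r => r.toList.length)) (fun x => x)).getD 0 := rfl
    rw [hw]
    set w := (PySem.List.max? ((g :: gs).map (fun r => r.toList.length)) (fun x => x)).getD 0 with hwdef
    rw [pvCols_eq (g :: gs) w, pvSplitGroups_eq]
    have hA : (List.range w).foldl (fun st col => pvStepA st (pvColA (g :: gs) col)) ([], [])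
        = ((List.range w).map (fun j => pvColChars (g :: gs) j)).foldl pvStepA ([], []) := by
      rw [List.foldl_map]
      apply PySem.List.foldl_congr_mem
      intro acc x _
      rw [pvColA_eq]
    rw [hA]
    have := pvFoldA ((List.range w).map (fun j => pvColChars (g :: gs) j)) [] []
    simpa using this
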